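-- pv_equiv track=rewrite | github.com/Tormyst/python-console-snake | Genetic/helper.py | pareto_rank
-- ===== SOURCE A (Python) =====
-- def dominating(score1, score2):
--     canDom1 = True
--     canDom2 = True
--     better1 = False
--     better2 = False
--     for goal1, goal2 in zip(score1, score2):
--         if goal1 > goal2:
--             better1 = True
--             canDom2 = False
--         elif goal2 > goal1:
--             better2 = True
--             canDom1 = False
--     if canDom1 and better1:
--         return 1
--     elif canDom2 and better2:
--         return 2
--     else:
--         return 0
--
-- def pareto_rank(population):
--     fitness = [0] * len(population)
--     for index1, prog1 in enumerate(population):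
--         score1 = prog1[1]
--         for index2, prog2 in enumerate(population[index1:]):
--             score2 = prog2[1]
--             dom = dominating(score1, score2)
--             if dom == 1:
--                 fitness[index2 + index1] += 1
--             elif dom == 2:
--                 fitness[index1] += 1
--     base = max(fitness) + 1
--     fitness = [base - s for s in fitness]
--     return fitness
-- ===== SOURCE B (Python) =====
-- def dominates(a, b):
--     noworse = all(x >= y for x, y in zip(a, b))
--     better = any(x > y for x, y in zip(a, b))
--     return noworse and better
--
-- def pareto_rank(population):
--     scores = [prog[1] for prog in population]
--     counts = [sum(1 for s in scores if dominates(s, t)) for t in scores]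
--     base = max(counts) + 1
--     return [base - c for c in counts]
-- ===== Notes on version B (the rewrite author's own statement) =====
-- stated objective: alternative
-- what changed: A makes one upper-triangular pass over index pairs with a three-way dominating() helper that updates two fitness cells in place; B precomputes the score list, uses a boolean one-directional dominates(a,b) predicate and, for each individual, directly counts over the whole population how many score vectors dominate it, with no in-place array updates.
import Mathlib
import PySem

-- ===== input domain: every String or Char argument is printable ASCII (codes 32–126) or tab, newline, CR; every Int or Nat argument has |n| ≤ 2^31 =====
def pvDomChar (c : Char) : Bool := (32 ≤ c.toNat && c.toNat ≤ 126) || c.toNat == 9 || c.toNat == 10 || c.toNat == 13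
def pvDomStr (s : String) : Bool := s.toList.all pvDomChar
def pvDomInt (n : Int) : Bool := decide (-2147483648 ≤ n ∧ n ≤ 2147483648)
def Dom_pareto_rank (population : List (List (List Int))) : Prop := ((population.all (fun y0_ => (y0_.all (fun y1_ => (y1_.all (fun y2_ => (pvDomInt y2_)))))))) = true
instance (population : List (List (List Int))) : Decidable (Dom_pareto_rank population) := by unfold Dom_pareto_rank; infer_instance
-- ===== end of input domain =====

-- B replaces A's upper-triangular in-place dual-update pass (three-way dominating helper)
-- by a direct per-individual domination count with a boolean dominates predicate; same cost,
-- different decomposition. Equivalence of the RETURN value is proved on Pre_ (A raises elsewhere).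

-- ===== PORT A =====
def dominating (score1 score2 : List Int) : Int :=
  let st := (List.zip score1 score2).foldl
    (fun (st : Bool × Bool × Bool × Bool) g =>
      if g.1 > g.2 then (st.1, false, true, st.2.2.2)
      else if g.2 > g.1 then (false, st.2.1, st.2.2.1, true)
      else st)
    (true, true, false, false)
  if st.1 && st.2.2.1 then 1
  else if st.2.1 && st.2.2.2 then 2
  else 0

def pareto_rank (population : List (List (List Int))) : List Int :=
  let fitness0 : List Int := List.replicate population.length 0
  let fitness := (PySem.List.enumerate population).foldl
    (fun fitness p =>
      let score1 := PySem.List.pyGetD p.2 1 []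
      (PySem.List.enumerate (PySem.List.slice population (some p.1) none)).foldl
        (fun fitness q =>
          let score2 := PySem.List.pyGetD q.2 1 []
          let dom := dominating score1 score2
          if dom = 1 then
            PySem.List.pySetD fitness (q.1 + p.1) (PySem.List.pyGetD fitness (q.1 + p.1) 0 + 1)
          else if dom = 2 then
            PySem.List.pySetD fitness p.1 (PySem.List.pyGetD fitness p.1 0 + 1)
          else fitness)
        fitness)
    fitness0
  let base := (PySem.List.max? fitness (fun x => x)).getD 0 + 1
  fitness.map (fun s => base - s)

-- ===== PORT B =====
def dominates (a b : List Int) : Bool :=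
  (List.zip a b).all (fun p => p.2 ≤ p.1) && (List.zip a b).any (fun p => p.2 < p.1)

def pareto_rank_alt (population : List (List (List Int))) : List Int :=
  let scores := population.map (fun prog => PySem.List.pyGetD prog 1 [])
  let counts : List Int := scores.map (fun t => ((scores.filter (fun s => dominates s t)).length : Int))
  let base := (PySem.List.max? counts (fun x => x)).getD 0 + 1
  counts.map (fun c => base - c)

-- ===== PRECONDITION & SPEC =====
-- Pre_ excludes exactly the inputs where the Python A raises: an empty population
-- (max of the empty fitness list is a ValueError) and any individual with fewer than
-- two items (prog[1] is an IndexError).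
def Pre_pareto_rank (population : List (List (List Int))) : Prop :=
  population ≠ [] ∧ ∀ prog ∈ population, 2 ≤ prog.length
instance (population : List (List (List Int))) : Decidable (Pre_pareto_rank population) := by
  unfold Pre_pareto_rank; infer_instance
def pvWitness_pareto_rank : List (List (List Int)) := [[[0], [1]], [[0], [0, 2]]]

def Spec_pareto_rank (population : List (List (List Int))) (out : List Int) : Prop := out = pareto_rank_alt population
instance (population : List (List (List Int))) (out : List Int) : Decidable (Spec_pareto_rank population out) := by unfold Spec_pareto_rank; infer_instance

-- ===== CLAIM (what is proved, stated in full; the proofs are below) =====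
def Claim_equal_pareto_rank : Prop := ∀ (population : List (List (List Int))), Dom_pareto_rank population → Pre_pareto_rank population → Spec_pareto_rank population (pareto_rank population)

-- ===== LEMMAS AND PROOFS =====

lemma dom_fold (z : List (Int × Int)) (c1 c2 b1 b2 : Bool) :
    z.foldl (fun (st : Bool × Bool × Bool × Bool) g =>
      if g.1 > g.2 then (st.1, false, true, st.2.2.2)
      else if g.2 > g.1 then (false, st.2.1, st.2.2.1, true)
      else st) (c1, c2, b1, b2)
    = (c1 && z.all (fun p => p.2 ≤ p.1), c2 && z.all (fun p => p.1 ≤ p.2),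
       b1 || z.any (fun p => p.2 < p.1), b2 || z.any (fun p => p.1 < p.2)) := by
  induction z generalizing c1 c2 b1 b2 with
  | nil => simp
  | cons g z ih =>
    rcases lt_trichotomy g.1 g.2 with h | h | h
    · have h1 : ¬ g.2 < g.1 := not_lt.2 h.le
      simp [h, h1, ih, not_le.2 h, h.le, Bool.and_assoc, Bool.or_assoc]
    · simp [h.le, h.ge, lt_irrefl, ih, h, Bool.and_assoc, Bool.or_assoc, not_lt.2 h.le]
    · have h1 : ¬ g.1 < g.2 := not_lt.2 h.le
      simp [h, h1, ih, not_le.2 h, h.le, Bool.and_assoc, Bool.or_assoc]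

lemma dominating_eq (a b : List Int) :
    dominating a b = if dominates a b then 1 else if dominates b a then 2 else 0 := by
  have hswap : List.zip b a = (List.zip a b).map Prod.swap := by
    rw [List.zip_swap]
  simp only [dominating, dominates, dom_fold, hswap, List.all_map, List.any_map]
  rfl


lemma zip_self_eq (a : List Int) : a.zip a = a.map (fun x => (x,x)) := by
  induction a with
  | nil => rfl
  | cons x t ih => simp [List.zip_cons_cons, ih]

lemma dominates_irrefl (a : List Int) : dominates a a = false := by
  simp [dominates, zip_self_eq]

lemma dominates_antisymm (a b : List Int) (h : dominates a b = true) : dominates b a = false := by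
  have hswap : List.zip b a = (List.zip a b).map Prod.swap := by rw [List.zip_swap]
  simp only [dominates, hswap, List.all_map, List.any_map] at *
  rcases (Bool.and_eq_true _ _).mp h with ⟨hall, hany⟩
  rcases List.any_eq_true.mp hany with ⟨p, hp, hlt⟩
  apply Bool.and_eq_false_iff.mpr
  left
  simp only [List.all_eq_false]
  exact ⟨p, hp, by simp at hlt ⊢; omega⟩

lemma dominating_eq_one_iff (a b : List Int) : (dominating a b = 1) = (dominates a b = true) := by
  rw [dominating_eq]
  by_cases h1 : dominates a b = true
  · simp [h1]
  · by_cases h2 : dominates b a = true <;> simp [h1, h2]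

lemma dominating_eq_two_iff (a b : List Int) : (dominating a b = 2) = (dominates b a = true) := by
  rw [dominating_eq]
  by_cases h2 : dominates b a = true
  · have h1 := dominates_antisymm b a h2
    simp [h1, h2]
  · by_cases h1 : dominates a b = true <;> simp [h1, h2]
def innerStep (s1 : List Int) (i1 : Int) (fitness : List Int) (q : Int × List (List Int)) : List Int :=
  let score2 := PySem.List.pyGetD q.2 1 []
  let dom := dominating s1 score2
  if dom = 1 then
    PySem.List.pySetD fitness (q.1 + i1) (PySem.List.pyGetD fitness (q.1 + i1) 0 + 1)
  else if dom = 2 then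
    PySem.List.pySetD fitness i1 (PySem.List.pyGetD fitness i1 0 + 1)
  else fitness

def outerStep (population : List (List (List Int))) (fitness : List Int) (p : Int × List (List Int)) : List Int :=
  (PySem.List.enumerate (PySem.List.slice population (some p.1) none)).foldl
    (innerStep (PySem.List.pyGetD p.2 1 []) p.1) fitness

lemma pareto_rank_eq (population : List (List (List Int))) : pareto_rank population =
    (let fitness := (PySem.List.enumerate population).foldl (outerStep population)
        (List.replicate population.length 0)
     let base := (PySem.List.max? fitness (fun x => x)).getD 0 + 1
     fitness.map (fun s => base - s)) := rfl

lemma innerStep_length (s1 : List Int) (i1 : Int) (f : List Int) (q : Int × List (List Int)) :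
    (innerStep s1 i1 f q).length = f.length := by
  simp only [innerStep]
  split_ifs <;> simp [PySem.List.length_pySetD]

lemma inner_foldl_length (s1 : List Int) (i1 : Int) (l : List (Int × List (List Int))) :
    ∀ f : List Int, (l.foldl (innerStep s1 i1) f).length = f.length := by
  induction l with
  | nil => intro f; rfl
  | cons q l ih => intro f; rw [List.foldl_cons, ih, innerStep_length]

lemma outerStep_length (population : List (List (List Int))) (f : List Int) (p : Int × List (List Int)) :
    (outerStep population f p).length = f.length := by
  simp only [outerStep, inner_foldl_length]

lemma outer_foldl_length (population : List (List (List Int))) (l : List (Int × List (List Int))) :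
    ∀ f : List Int, (l.foldl (outerStep population) f).length = f.length := by
  induction l with
  | nil => intro f; rfl
  | cons q l ih => intro f; rw [List.foldl_cons, ih, outerStep_length]

lemma getD_set_eq (f : List Int) (n k : Nat) (hk : k < f.length) :
    (f.set n (f.getD n 0 + 1)).getD k 0 = f.getD k 0 + (if n = k then 1 else 0) := by
  by_cases h : n = k
  · subst h
    rw [List.getD_eq_getElem _ _ (by simpa using hk), List.getElem_set_self]
    simp [List.getD_eq_getElem _ _ hk]
  · rw [List.getD_eq_getElem?_getD, List.getElem?_set_ne h, ← List.getD_eq_getElem?_getD]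
    simp [h]

def innerPred (s1 : List Int) (s k : Nat) (q : Int × List (List Int)) : Bool :=
  (dominating s1 (PySem.List.pyGetD q.2 1 []) == 1 && q.1 + (s : Int) == (k : Int))
  || (dominating s1 (PySem.List.pyGetD q.2 1 []) == 2 && (s : Int) == (k : Int))

lemma upd_getD (f : List Int) (n k : Nat) (hk : k < f.length) :
    (PySem.List.pySetD f ((n : Nat) : Int) (PySem.List.pyGetD f ((n : Nat) : Int) 0 + 1)).getD k 0
    = f.getD k 0 + (if n = k then 1 else 0) := by
  rw [PySem.List.pySetD_natCast, PySem.List.pyGetD_natCast]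
  exact getD_set_eq f n k hk

lemma inner_getD (s1 : List Int) (s k : Nat) :
    ∀ (u : List (List (List Int))) (j : Nat) (f : List Int), k < f.length →
    ((PySem.List.enumerate u (j : Int)).foldl (innerStep s1 (s : Int)) f).getD k 0
    = f.getD k 0 + ((PySem.List.enumerate u (j : Int)).countP (innerPred s1 s k) : Int) := by
  intro u
  induction u with
  | nil => intro j f hk; simp [PySem.List.enumerate_nil]
  | cons p u ih =>
    intro j f hk
    rw [PySem.List.enumerate_cons, List.foldl_cons, List.countP_cons]
    have hj1 : (j : Int) + 1 = ((j + 1 : Nat) : Int) := by push_cast; ring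
    have hlen : (innerStep s1 (s : Int) f ((j : Int), p)).length = f.length := innerStep_length ..
    rw [hj1, ih (j + 1) _ (by rw [hlen]; exact hk)]
    have hstep : (innerStep s1 (s : Int) f ((j : Int), p)).getD k 0
        = f.getD k 0 + (if innerPred s1 s k ((j : Int), p) then 1 else 0) := by
      simp only [innerStep, innerPred]
      by_cases h1 : dominating s1 (PySem.List.pyGetD p 1 []) = 1
      · have hidx : (j : Int) + (s : Int) = ((j + s : Nat) : Int) := by push_cast; ring
        rw [if_pos h1]
        simp only [hidx]
        rw [upd_getD f (j + s) k hk]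
        simp only [h1]
        norm_num
        split_ifs <;> omega
      · by_cases h2 : dominating s1 (PySem.List.pyGetD p 1 []) = 2
        · rw [if_neg h1, if_pos h2]
          rw [upd_getD f s k hk]
          simp [h2, Nat.cast_inj]
        · rw [if_neg h1, if_neg h2]
          simp [h1, h2]
    rw [hstep]
    push_cast
    ring
lemma count_eval (s1 : List Int) (s k : Nat) :
    ∀ (u : List (List (List Int))) (j : Nat),
    (PySem.List.enumerate u (j : Int)).countP (innerPred s1 s k)
    = (if j + s ≤ k ∧ k < j + s + u.length ∧
          dominating s1 (PySem.List.pyGetD (u.getD (k - (j + s)) []) 1 []) = 1 then 1 else 0)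
      + (if s = k then u.countP (fun prog => dominating s1 (PySem.List.pyGetD prog 1 []) == 2) else 0) := by
  intro u
  induction u with
  | nil =>
    intro j
    simp [PySem.List.enumerate_nil]
    intro h1 h2
    omega
  | cons p u ih =>
    intro j
    rw [PySem.List.enumerate_cons, List.countP_cons, List.countP_cons,
        show (j : Int) + 1 = ((j + 1 : Nat) : Int) by push_cast; ring, ih (j + 1)]
    have hpred : (if innerPred s1 s k ((j : Int), p) then 1 else 0)
        = ((if dominating s1 (PySem.List.pyGetD p 1 []) = 1 ∧ j + s = k then 1 else 0)
          + (if dominating s1 (PySem.List.pyGetD p 1 []) = 2 ∧ s = k then 1 else 0) : Nat) := by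
      simp only [innerPred]
      have hb : (((j : Int) + (s : Int)) == ((k : Nat) : Int)) = (decide (j + s = k)) := by
        by_cases h : j + s = k <;> simp [h] <;> omega
      by_cases hd1 : dominating s1 (PySem.List.pyGetD p 1 []) = 1
      · simp [hd1, hb]
      · by_cases hd2 : dominating s1 (PySem.List.pyGetD p 1 []) = 2
        · simp [hd1, hd2, Nat.cast_inj]
        · simp [hd1, hd2]
    rw [hpred]
    rcases Nat.lt_trichotomy (j + s) k with hlt | heq | hgt
    · have ha' : j + 1 + s ≤ k := by omega
      have ha : j + s ≤ k := by omega
      have hb : (k < j + 1 + s + u.length) ↔ (k < j + s + (p :: u).length) := by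
        simp only [List.length_cons]; omega
      have hgd : k - (j + s) = (k - (j + 1 + s)) + 1 := by omega
      have hne : ¬ (j + s = k) := by omega
      simp only [hgd, List.getD_cons_succ, ha, ha', hb, hne, and_false, if_false,
        true_and, and_true, if_true]
      by_cases hsk : s = k <;> by_cases hd2 : dominating s1 (PySem.List.pyGetD p 1 []) = 2 <;>
        simp [hsk, hd2] <;> omega
    · have ha : j + s ≤ k := le_of_eq heq
      have hb : k < j + s + (p :: u).length := by simp only [List.length_cons]; omega
      have hc' : ¬ (j + 1 + s ≤ k) := by omega
      have hgd : k - (j + s) = 0 := by omega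
      simp only [hgd, List.getD_cons_zero, ha, hb, hc', false_and, if_false, true_and, if_true, heq, and_true]
      by_cases hsk : s = k <;>
        by_cases hd1 : dominating s1 (PySem.List.pyGetD p 1 []) = 1 <;>
        by_cases hd2 : dominating s1 (PySem.List.pyGetD p 1 []) = 2 <;>
        simp [hsk, hd1, hd2] <;> omega
    · have hc' : ¬ (j + 1 + s ≤ k) := by omega
      have hc : ¬ (j + s ≤ k) := by omega
      have hne : ¬ (j + s = k) := by omega
      simp only [hc, hc', hne, false_and, and_false, if_false]
      by_cases hsk : s = k <;> by_cases hd2 : dominating s1 (PySem.List.pyGetD p 1 []) = 2 <;>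
        simp [hsk, hd2]
lemma getD_drop (l : List (List (List Int))) (s m : Nat) :
    (l.drop s).getD m [] = l.getD (s + m) [] := by
  rw [List.getD_eq_getElem?_getD, List.getD_eq_getElem?_getD, List.getElem?_drop]

lemma outer_getD :
    ∀ (t full : List (List (List Int))) (s k : Nat) (f : List Int),
    full.drop s = t → f.length = full.length → k < full.length →
    ((PySem.List.enumerate t (s : Int)).foldl (outerStep full) f).getD k 0
    = f.getD k 0
      + (((full.drop s).take (k + 1 - s)).countP
           (fun prog => dominates (PySem.List.pyGetD prog 1 []) (PySem.List.pyGetD (full.getD k []) 1 [])) : Int)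
      + (if s ≤ k then
           ((full.drop k).countP
             (fun prog => dominating (PySem.List.pyGetD (full.getD k []) 1 []) (PySem.List.pyGetD prog 1 []) == 2) : Int)
         else 0) := by
  intro t
  induction t with
  | nil =>
    intro full s k f hdrop hlen hk
    have hs : full.length ≤ s := by
      by_contra h
      have := congrArg List.length hdrop
      simp [List.length_drop] at this; omega
    have hns : ¬ s ≤ k := by omega
    simp [PySem.List.enumerate_nil, hdrop, hns]
  | cons p t ih =>
    intro full s k f hdrop hlen hk
    have hs : s < full.length := by
      by_contra h
      rw [List.drop_eq_nil_of_le (by omega)] at hdrop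
      simp at hdrop
    have hdrop1 : full.drop (s + 1) = t := by
      have h := congrArg List.tail hdrop
      simpa [List.tail_drop] using h
    have hgets : full.getD s [] = p := by
      have h0 := congrArg (fun l => l.getD 0 ([] : List (List Int))) hdrop
      simpa [getD_drop] using h0
    rw [PySem.List.enumerate_cons, List.foldl_cons,
        show (s : Int) + 1 = ((s + 1 : Nat) : Int) by push_cast; ring]
    have hstep : outerStep full f ((s : Int), p)
        = (PySem.List.enumerate (full.drop s) ((0 : Nat) : Int)).foldl
            (innerStep (PySem.List.pyGetD p 1 []) (s : Int)) f := by
      simp [outerStep, PySem.List.slice_from_natCast]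
    have hsteplen : (outerStep full f ((s : Int), p)).length = f.length := outerStep_length ..
    rw [ih full (s + 1) k _ hdrop1 (by rw [hsteplen, hlen]) hk]
    rw [hstep, inner_getD _ s k (full.drop s) 0 f (by rw [hlen]; exact hk),
        count_eval _ s k (full.drop s) 0]
    have hdlen : s + (full.drop s).length = full.length := by
      simp [List.length_drop]; omega
    rcases Nat.lt_trichotomy s k with hlt | heq | hgt
    · have hc1 : 0 + s ≤ k := by omega
      have hc2 : k < 0 + s + (full.drop s).length := by omega
      have hgd : (full.drop s).getD (k - (0 + s)) [] = full.getD k [] := by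
        rw [getD_drop]; congr 1; omega
      have hne : ¬ (s = k) := by omega
      have hsk : s ≤ k := by omega
      have hsk1 : s + 1 ≤ k := by omega
      have hseg : (full.drop s).take (k + 1 - s)
          = p :: (full.drop (s + 1)).take (k + 1 - (s + 1)) := by
        rw [hdrop, hdrop1, show k + 1 - s = (k + 1 - (s + 1)) + 1 by omega, List.take_succ_cons]
      rw [hseg, List.countP_cons]
      simp only [hgd, hc1, hc2, hne, if_false, true_and, if_true, hdrop1, hsk, hsk1,
        dominating_eq_one_iff]
      push_cast
      split_ifs <;> ring
    · subst heq
      have hgd : (full.drop s).getD (s - (0 + s)) [] = full.getD s [] := by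
        rw [getD_drop]; congr 1; omega
      have hT1 : ¬ (0 + s ≤ s ∧ s < 0 + s + (full.drop s).length ∧
          dominating (PySem.List.pyGetD p 1 [])
            (PySem.List.pyGetD ((full.drop s).getD (s - (0 + s)) []) 1 []) = 1) := by
        rintro ⟨-, -, hd⟩
        rw [hgd, hgets, dominating_eq_one_iff, dominates_irrefl] at hd
        cases hd
      have hsegl : (full.drop s).take (s + 1 - s) = [p] := by
        rw [hdrop, show s + 1 - s = 1 by omega]
        rfl
      have hseg0 : (full.drop (s + 1)).take (s + 1 - (s + 1)) = [] := by
        simp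
      have hns1 : ¬ (s + 1 ≤ s) := by omega
      simp only [if_neg hT1, hsegl, hseg0, List.countP_cons, List.countP_nil, hns1, if_false,
        le_refl, if_true, hgets, dominates_irrefl, if_pos rfl]
      push_cast
      ring
    · have hc1 : ¬ (0 + s ≤ k) := by omega
      have hne : ¬ (s = k) := by omega
      have hns : ¬ (s ≤ k) := by omega
      have hns1 : ¬ (s + 1 ≤ k) := by omega
      have hseg : (full.drop s).take (k + 1 - s) = [] := by
        rw [show k + 1 - s = 0 by omega]; rfl
      have hseg1 : (full.drop (s + 1)).take (k + 1 - (s + 1)) = [] := by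
        rw [show k + 1 - (s + 1) = 0 by omega]; rfl
      simp [hc1, hne, hns, hns1, hseg, hseg1]
      intro a ha
      rw [show k - s = 0 by omega] at ha
      simp at ha
lemma dominating_eq_two_bool (a b : List Int) : (dominating a b == 2) = dominates b a := by
  by_cases h : dominates b a = true
  · simp [(dominating_eq_two_iff a b) ▸ h, h]
  · have h2 : ¬ (dominating a b = 2) := by
      rw [dominating_eq_two_iff]; exact h
    simp [h2, Bool.eq_false_iff.mpr h]

lemma fitness_eq (population : List (List (List Int))) :
    (PySem.List.enumerate population).foldl (outerStep population)
        (List.replicate population.length 0)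
    = (population.map (fun prog => PySem.List.pyGetD prog 1 [])).map
        (fun t => (((population.map (fun prog => PySem.List.pyGetD prog 1 [])).filter
            (fun s => dominates s t)).length : Int)) := by
  apply List.ext_getElem
  · rw [outer_foldl_length]; simp
  · intro k h1 h2
    have hk : k < population.length := by
      have := h1; rwa [outer_foldl_length, List.length_replicate] at this
    rw [← List.getD_eq_getElem _ 0 h1, ← List.getD_eq_getElem _ 0 h2]
    have h0 : PySem.List.enumerate population = PySem.List.enumerate population ((0 : Nat) : Int) := by
      norm_num
    rw [h0, outer_getD population population 0 k _ List.drop_zero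
          (by simp) hk]
    simp only [Nat.sub_zero, List.take_zero, List.drop_zero, if_pos (Nat.zero_le k),
      List.getD_replicate, dominating_eq_two_bool]
    have hdropk : population.drop k = population[k] :: population.drop (k + 1) :=
      List.drop_eq_getElem_cons hk
    have hgdk : population.getD k [] = population[k] := List.getD_eq_getElem _ _ hk
    rw [hdropk, List.countP_cons]
    have hself : (dominates (PySem.List.pyGetD population[k] 1 [])
        (PySem.List.pyGetD (population.getD k []) 1 [])) = false := by
      rw [hgdk, dominates_irrefl]
    rw [hself]
    have hsplit : (population.take (k + 1)).countP
          (fun prog => dominates (PySem.List.pyGetD prog 1 [])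
            (PySem.List.pyGetD (population.getD k []) 1 []))
        + (population.drop (k + 1)).countP
          (fun prog => dominates (PySem.List.pyGetD prog 1 [])
            (PySem.List.pyGetD (population.getD k []) 1 []))
        = population.countP
          (fun prog => dominates (PySem.List.pyGetD prog 1 [])
            (PySem.List.pyGetD (population.getD k []) 1 [])) := by
      rw [← List.countP_append, List.take_append_drop]
    have hrhs : (List.map
          (fun t => ((List.filter (fun s => dominates s t)
                (List.map (fun prog => PySem.List.pyGetD prog 1 []) population)).length : Int))
          (List.map (fun prog => PySem.List.pyGetD prog 1 []) population)).getD k 0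
        = ((population.countP
            (fun prog => dominates (PySem.List.pyGetD prog 1 [])
              (PySem.List.pyGetD (population.getD k []) 1 []))) : Int) := by
      rw [List.getD_eq_getElem _ _ h2, List.getElem_map, List.getElem_map]
      rw [← List.countP_eq_length_filter, List.countP_map, hgdk]
      rfl
    rw [hrhs, ← hsplit]
    have hrep : (List.replicate population.length (0 : Int)).getD k 0 = 0 := by
      rw [List.getD_eq_getElem _ _ (by simpa using hk)]
      simp
    rw [hrep]
    push_cast
    ring
lemma main_eq (population : List (List (List Int))) :
    pareto_rank population = pareto_rank_alt population := by
  rw [pareto_rank_eq]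
  simp only [pareto_rank_alt]
  rw [fitness_eq]

-- ===== VERDICT (by name: the statement is the Claim_ definition above) =====
theorem pareto_rank_spec : Claim_equal_pareto_rank := by
  intro population _ _
  unfold Spec_pareto_rank
  exact main_eq population
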